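-- pv_equiv track=rewrite | github.com/pypi-data/pypi-mirror-378 | packages/reqsmith/reqsmith-0.1.0.tar.gz/reqsmith-0.1.0/src/reqsmith/core/env_manager.py | _is_valid_environment_name
-- ===== SOURCE A (Python) =====
-- def _is_valid_environment_name(name: str) -> bool:
--     """Validate environment name."""
--     if not name or len(name.strip()) == 0:
--         return False
--
--     # Check for invalid characters
--     invalid_chars = ['/', '\\', ':', '*', '?', '"', '<', '>', '|']
--     for char in invalid_chars:
--         if char in name:
--             return False
--
--     # Check length
--     if len(name) > 50:
--         return False
--
--     return True
-- ===== SOURCE B (Python) =====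
-- def _is_valid_environment_name(name: str) -> bool:
--     """Validate environment name (single pass over the characters)."""
--     if len(name) > 50:
--         return False
--     has_visible = False
--     for c in name:
--         if c in '/\\:*?"<>|':
--             return False
--         if not c.isspace():
--             has_visible = True
--     return has_visible
-- ===== Notes on version B (the rewrite author's own statement) =====
-- stated objective: alternative
-- what changed: A runs three separate guards (empty/strip test, then nine substring scans of the name, then a length check); B checks the length once and then makes a single pass over the characters, rejecting on a forbidden character and tracking whether a non-whitespace character was seen.
import Mathlib
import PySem

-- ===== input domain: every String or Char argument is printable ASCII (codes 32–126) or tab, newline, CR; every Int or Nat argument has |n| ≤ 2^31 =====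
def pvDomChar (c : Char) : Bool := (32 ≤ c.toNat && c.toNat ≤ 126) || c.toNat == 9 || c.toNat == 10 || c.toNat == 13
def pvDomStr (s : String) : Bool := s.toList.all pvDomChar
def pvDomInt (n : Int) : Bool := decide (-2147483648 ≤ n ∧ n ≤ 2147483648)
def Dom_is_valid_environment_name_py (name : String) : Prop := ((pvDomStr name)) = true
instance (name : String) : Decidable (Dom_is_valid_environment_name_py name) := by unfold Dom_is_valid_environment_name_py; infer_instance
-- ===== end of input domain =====

-- B replaces A's guard chain (empty/strip test, then nine substring scans of the name) by one single pass
-- over the characters that tracks "saw a non-space char" and rejects on a forbidden char — objective: alternative.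

-- ===== PORT A =====
-- invalid_chars = ['/', '\\', ':', '*', '?', '"', '<', '>', '|']
def pvInvalidChars : List Char := ['/', '\\', ':', '*', '?', '"', '<', '>', '|']

def is_valid_environment_name_py (name : String) : Bool :=
  let cs := name.toList
  -- if not name or len(name.strip()) == 0: return False
  if cs.length = 0 ∨ (PySem.Chars.strip cs).length = 0 then false
  -- for char in invalid_chars: if char in name: return False
  else if pvInvalidChars.any (fun c => PySem.Chars.isIn [c] cs) then false
  -- if len(name) > 50: return False
  else if cs.length > 50 then false
  else true

-- ===== PORT B =====
-- the string literal '/\\:*?"<>|' of Source B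
def pvForbidden : List Char := String.toList "/\\:*?\"<>|"

-- the loop of Source B: early return False on a forbidden char, else track has_visible
def pvAltScan : List Char → Bool → Bool
  | [], hasVisible => hasVisible
  | c :: rest, hasVisible =>
    if PySem.Chars.isIn [c] pvForbidden then false
    else pvAltScan rest (hasVisible || !(PySem.Chars.isspace c))

def is_valid_environment_name_py_alt (name : String) : Bool :=
  if name.toList.length > 50 then false
  else pvAltScan name.toList false

-- ===== PRECONDITION & SPEC =====
def Spec_is_valid_environment_name_py (name : String) (out : Bool) : Prop := out = is_valid_environment_name_py_alt name
instance (name : String) (out : Bool) : Decidable (Spec_is_valid_environment_name_py name out) := by unfold Spec_is_valid_environment_name_py; infer_instance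

-- ===== CLAIM (what is proved, stated in full; the proofs are below) =====
def Claim_equal_is_valid_environment_name_py : Prop := ∀ (name : String), Dom_is_valid_environment_name_py name → Spec_is_valid_environment_name_py name (is_valid_environment_name_py name)

-- ===== LEMMAS AND PROOFS =====

-- single-char `in` is membership
theorem pvIsIn_singleton (c : Char) (cs : List Char) :
    PySem.Chars.isIn [c] cs = cs.contains c := by
  by_cases h : c ∈ cs
  · simp [PySem.Chars.isIn_iff_infix, List.singleton_infix_iff, h]
  · have : PySem.Chars.isIn [c] cs = false := by
      rw [PySem.Chars.isIn_eq_false_iff, List.singleton_infix_iff]; exact h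
    simp [this, h]

-- name.strip() is empty exactly when every character is whitespace
theorem pvStrip_nil_iff (cs : List Char) :
    PySem.Chars.strip cs = [] ↔ ∀ x ∈ cs, PySem.Chars.isspace x := by
  simp only [PySem.Chars.strip, PySem.Chars.lstrip, PySem.Chars.rstrip,
    List.reverse_eq_nil_iff, List.dropWhile_eq_nil_iff, List.mem_reverse]
  constructor
  · intro h x hx
    have := List.takeWhile_append_dropWhile (p := PySem.Chars.isspace) (l := cs)
    rw [← this] at hx
    rcases List.mem_append.mp hx with hx | hx
    · exact List.mem_takeWhile_imp hx
    · exact h x hx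
  · intro h x hx
    exact h x ((List.dropWhile_sublist PySem.Chars.isspace).mem hx)

-- closed form of B's scan loop
theorem pvAltScan_eq (cs : List Char) (hv : Bool) :
    pvAltScan cs hv =
      ((!cs.any (fun c => PySem.Chars.isIn [c] pvForbidden)) &&
        (hv || cs.any (fun c => !(PySem.Chars.isspace c)))) := by
  induction cs generalizing hv with
  | nil => simp [pvAltScan]
  | cons c rest ih =>
    by_cases h : PySem.Chars.isIn [c] pvForbidden
    · simp [pvAltScan, h]
    · simp only [pvAltScan, h, Bool.false_eq_true, if_neg, not_false_iff, List.any_cons]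
      rw [ih]
      simp [Bool.or_assoc]

-- A's nine substring scans find a bad char iff B's per-char test fires somewhere
theorem pvBad_swap (cs : List Char) :
    pvInvalidChars.any (fun c => PySem.Chars.isIn [c] cs) =
      cs.any (fun c => PySem.Chars.isIn [c] pvForbidden) := by
  have he : pvForbidden = pvInvalidChars := by decide
  rw [he]
  simp only [pvIsIn_singleton]
  rw [Bool.eq_iff_iff]
  simp only [List.any_eq_true, List.contains_iff_mem]
  exact ⟨fun ⟨a, h1, h2⟩ => ⟨a, h2, h1⟩, fun ⟨a, h1, h2⟩ => ⟨a, h2, h1⟩⟩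

-- ===== VERDICT (by name: the statement is the Claim_ definition above) =====
theorem is_valid_environment_name_py_spec : Claim_equal_is_valid_environment_name_py := by
  intro name _
  unfold Spec_is_valid_environment_name_py is_valid_environment_name_py is_valid_environment_name_py_alt
  rw [pvAltScan_eq, ← pvBad_swap]
  set cs := name.toList with hcs
  by_cases hvis : cs.any (fun c => !(PySem.Chars.isspace c))
  · -- some non-space character: A's first guard does not fire
    have h0 : ¬ (cs.length = 0 ∨ (PySem.Chars.strip cs).length = 0) := by
      obtain ⟨x, hx, hxs⟩ := List.any_eq_true.mp hvis
      rintro (h | h)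
      · rw [List.length_eq_zero_iff.mp h] at hx; exact absurd hx (List.not_mem_nil)
      · have := (pvStrip_nil_iff cs).mp (List.length_eq_zero_iff.mp h) x hx
        simp [this] at hxs
    rw [if_neg h0]
    by_cases hbad : pvInvalidChars.any (fun c => PySem.Chars.isIn [c] cs)
    · rw [if_pos hbad]
      simp [hbad]
    · have hb' : (pvInvalidChars.any fun c => PySem.Chars.isIn [c] cs) = false := by
        simpa using hbad
      rw [if_neg hbad]
      by_cases hlen : cs.length > 50
      · rw [if_pos hlen, if_pos hlen]
      · rw [if_neg hlen, if_neg hlen]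
        simp [hb', hvis]
  · -- every character is whitespace: both reject
    have hsp : ∀ x ∈ cs, PySem.Chars.isspace x := by
      intro x hx
      have := List.any_eq_false.mp (eq_false_of_ne_true hvis) x hx
      simpa using this
    have h0 : cs.length = 0 ∨ (PySem.Chars.strip cs).length = 0 := by
      right; simp [(pvStrip_nil_iff cs).mpr hsp]
    rw [if_pos h0]
    have hv' : (cs.any fun c => !(PySem.Chars.isspace c)) = false := eq_false_of_ne_true hvis
    simp [hv']
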